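-- pv_equiv track=rewrite | github.com/hienpham15/Codeforces_competitions | Codeforces_round734/B.py | func
-- ===== SOURCE A (Python) =====
-- from collections import Counter
--
-- def func(s):
--     n = len(s)
--     if n < 2:
--         return 0
--     t_max = n//2
--
--     chars = Counter(s)
--     red, green = [], []
--     for char, num in chars.items():
--         if num >= 2:
--             red.append(char)
--             green.append(char)
--         else:
--             if len(red) > len(green):
--                 green.append(char)
--             else:
--                 red.append(char)
--     ans = min(len(red), len(green))
--     return ans
-- ===== SOURCE B (Python) =====
-- from collections import Counter
--
-- def func(s):
--     c = Counter(s)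
--     d = sum(1 for v in c.values() if v >= 2)
--     u = len(c) - d
--     return d + u // 2
-- ===== Notes on version B (the rewrite author's own statement) =====
-- stated objective: simpler
-- what changed: Replaces the red/green balancing loop over the Counter with a closed-form count: d distinct chars with count>=2 plus u//2 for the u singletons.
import Mathlib
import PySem

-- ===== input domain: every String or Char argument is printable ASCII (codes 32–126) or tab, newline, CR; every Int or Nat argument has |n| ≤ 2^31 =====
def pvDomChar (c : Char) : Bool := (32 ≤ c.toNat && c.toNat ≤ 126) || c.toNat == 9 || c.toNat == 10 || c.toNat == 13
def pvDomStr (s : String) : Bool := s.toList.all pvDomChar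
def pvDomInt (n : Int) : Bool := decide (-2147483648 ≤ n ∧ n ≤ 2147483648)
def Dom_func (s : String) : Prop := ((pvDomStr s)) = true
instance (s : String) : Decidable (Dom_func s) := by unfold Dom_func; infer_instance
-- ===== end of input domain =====

-- B replaces A's red/green balancing loop by the closed-form count d + u // 2 (simpler; same result).

-- ===== PORT A =====
-- loop body of A's 'for char, num in chars.items()' loop, on the (red, green) state
def pvStep (rg : List Char × List Char) (p : Char × Int) : List Char × List Char :=
  if 2 ≤ p.2 then (rg.1 ++ [p.1], rg.2 ++ [p.1])
  else if rg.2.length < rg.1.length then (rg.1, rg.2 ++ [p.1])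
  else (rg.1 ++ [p.1], rg.2)

def func (s : String) : Int :=
  let n := PySem.Str.len s
  if n < 2 then 0
  else
    let _t_max := PySem.Int.floordiv n 2
    let chars := PySem.Dict.counter s.toList
    let rg := chars.items.foldl pvStep ([], [])
    min (rg.1.length : Int) (rg.2.length : Int)

-- ===== PORT B =====
def func_alt (s : String) : Int :=
  let c := PySem.Dict.counter s.toList
  let d : Int := ((c.values.filter (fun v => 2 ≤ v)).length : Int)
  let u : Int := (c.size : Int) - d
  d + PySem.Int.floordiv u 2

-- ===== PRECONDITION & SPEC =====
def Spec_func (s : String) (out : Int) : Prop := out = func_alt s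
instance (s : String) (out : Int) : Decidable (Spec_func s out) := by unfold Spec_func; infer_instance

-- ===== CLAIM (what is proved, stated in full; the proofs are below) =====
def Claim_equal_func : Prop := ∀ (s : String), Dom_func s → Spec_func s (func s)

-- ===== LEMMAS AND PROOFS =====

-- invariant of A's balancing loop: the two lists stay within one of each other and their
-- total length grows by 2 per count≥2 key and by 1 per other key
lemma pvStep_foldl_len (l : List (Char × Int)) (r g : List Char)
    (h1 : g.length ≤ r.length) (h2 : r.length ≤ g.length + 1) :
    (l.foldl pvStep (r, g)).1.length + (l.foldl pvStep (r, g)).2.length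
        = r.length + g.length + l.length + l.countP (fun p => decide (2 ≤ p.2))
    ∧ (l.foldl pvStep (r, g)).2.length ≤ (l.foldl pvStep (r, g)).1.length
    ∧ (l.foldl pvStep (r, g)).1.length ≤ (l.foldl pvStep (r, g)).2.length + 1 := by
  induction l generalizing r g with
  | nil => simpa using ⟨h1, h2⟩
  | cons p t ih =>
    simp only [List.foldl_cons, List.countP_cons, List.length_cons]
    by_cases hp : 2 ≤ p.2
    · have := ih (r ++ [p.1]) (g ++ [p.1]) (by simpa using h1) (by simp; omega)
      simp only [pvStep, if_pos hp] at *
      simp only [List.length_append, List.length_singleton] at this ⊢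
      simp [hp]; omega
    · by_cases hlt : g.length < r.length
      · have := ih r (g ++ [p.1]) (by simp; omega) (by simp; omega)
        simp only [pvStep, if_neg hp, if_pos hlt] at *
        simp only [List.length_append, List.length_singleton] at this ⊢
        simp [hp]; omega
      · have := ih (r ++ [p.1]) g (by simp; omega) (by simp; omega)
        simp only [pvStep, if_neg hp, if_neg hlt] at *
        simp only [List.length_append, List.length_singleton] at this ⊢
        simp [hp]; omega

-- B's value as a Nat formula over the counter's items
lemma func_alt_closed (s : String) :
    func_alt s =
      ((((PySem.Dict.counter s.toList).items.countP (fun p => decide (2 ≤ p.2)))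
        + ((PySem.Dict.counter s.toList).items.length
            - (PySem.Dict.counter s.toList).items.countP (fun p => decide (2 ≤ p.2))) / 2 : Nat) : Int) := by
  unfold func_alt
  set l := (PySem.Dict.counter s.toList).items with hl
  have hv : (PySem.Dict.counter s.toList).values = l.map (·.2) := rfl
  have hs : (PySem.Dict.counter s.toList).size = l.length := rfl
  have hd : ((PySem.Dict.counter s.toList).values.filter (fun v => 2 ≤ v)).length
      = l.countP (fun p => decide (2 ≤ p.2)) := by
    rw [hv, ← List.countP_eq_length_filter, List.countP_map]
    rfl
  have hle : l.countP (fun p => decide (2 ≤ p.2)) ≤ l.length := List.countP_le_length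
  simp only [hd, hs]
  rw [PySem.Int.floordiv_eq_ediv_of_pos (by omega)]
  push_cast [hle]
  omega

-- ===== VERDICT (by name: the statement is the Claim_ definition above) =====
theorem func_spec : Claim_equal_func := by
  intro s _
  unfold Spec_func func
  simp only [PySem.Str.len_eq]
  rw [func_alt_closed s]
  by_cases hn : (s.toList.length : Int) < 2
  · rw [if_pos hn]
    rcases hcs : s.toList with _ | ⟨c, _ | ⟨c', t⟩⟩
    · simp [PySem.Dict.counter, PySem.Dict.empty]
    · simp [PySem.Dict.items_counter, PySem.Set.ofList]
    · rw [hcs] at hn; simp at hn; omega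
  · rw [if_neg hn]
    have := pvStep_foldl_len (PySem.Dict.counter s.toList).items [] [] (le_refl 0) (by omega)
    set rg := (PySem.Dict.counter s.toList).items.foldl pvStep ([], []) with hrg
    obtain ⟨hsum, hge, hle⟩ := this
    simp only [List.length_nil] at hsum
    have hDle : (PySem.Dict.counter s.toList).items.countP (fun p => decide (2 ≤ p.2))
        ≤ (PySem.Dict.counter s.toList).items.length := List.countP_le_length
    omega
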